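-- pv_equiv track=rewrite | github.com/drussell23/JARVIS | backend/core/ouroboros/governance/entropy_calculator.py | extract_domain_key
-- ===== SOURCE A (Python) =====
-- from typing import Any, Dict, List, Optional, Tuple
--
-- def extract_domain_key(
--     target_files: Tuple[str, ...],
--     description: str = "",
-- ) -> str:
--     """Extract a capability domain key from operation context.
--
--     The domain key groups operations into capability categories for
--     chronic entropy tracking. Deterministic — based on file extensions
--     and structural patterns, not semantic analysis.
--
--     Format: "{category}::{primary_extension}"
--     Examples: "code_gen::.py", "config::.yaml", "test::.py"
--     """
--     if not target_files:
--         return "unknown::unknown"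
--
--     # Primary extension from first target file
--     primary = target_files[0]
--     ext = "." + primary.rsplit(".", 1)[-1] if "." in primary else ".unknown"
--
--     # Category from path structure (deterministic)
--     if any("test" in f.lower() for f in target_files):
--         category = "test_fix"
--     elif any(f.endswith((".yaml", ".yml", ".json", ".toml", ".env")) for f in target_files):
--         category = "config"
--     elif any("requirements" in f.lower() for f in target_files):
--         category = "dependency"
--     elif any(f.endswith((".md", ".rst", ".txt")) for f in target_files):
--         category = "documentation"
--     else:
--         category = "code_gen"
--
--     return f"{category}::{ext}"
-- ===== SOURCE B (Python) =====
-- def _file_rank(f):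
--     low = f.lower()
--     if "test" in low:
--         return 0
--     if f.endswith((".yaml", ".yml", ".json", ".toml", ".env")):
--         return 1
--     if "requirements" in low:
--         return 2
--     if f.endswith((".md", ".rst", ".txt")):
--         return 3
--     return 4
--
-- _CATEGORIES = ("test_fix", "config", "dependency", "documentation", "code_gen")
--
-- def extract_domain_key(target_files, description=""):
--     if not target_files:
--         return "unknown::unknown"
--     first = target_files[0]
--     ext = "." + first.rsplit(".", 1)[-1] if "." in first else ".unknown"
--     category = _CATEGORIES[min(map(_file_rank, target_files))]
--     return f"{category}::{ext}"
-- ===== Notes on version B (the rewrite author's own statement) =====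
-- stated objective: alternative
-- what changed: The four priority-ordered any(...) scans are replaced by a per-file rank function (0..4), a single min over the ranks of all files, and a category lookup table indexed by that minimum.
import Mathlib
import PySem

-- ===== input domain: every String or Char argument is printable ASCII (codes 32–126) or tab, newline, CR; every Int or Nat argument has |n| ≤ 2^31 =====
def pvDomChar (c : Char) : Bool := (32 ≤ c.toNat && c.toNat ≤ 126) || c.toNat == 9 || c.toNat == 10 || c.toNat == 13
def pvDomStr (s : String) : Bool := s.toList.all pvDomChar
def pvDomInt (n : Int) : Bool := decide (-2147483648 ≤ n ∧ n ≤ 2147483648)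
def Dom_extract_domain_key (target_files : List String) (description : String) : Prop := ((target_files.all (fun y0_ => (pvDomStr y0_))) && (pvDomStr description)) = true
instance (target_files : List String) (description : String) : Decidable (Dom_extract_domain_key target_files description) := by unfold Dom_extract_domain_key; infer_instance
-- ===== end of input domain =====

-- B replaces the four priority-ordered any(...) scans with a per-file rank function, one min over
-- the ranks and a category table (alternative decomposition; same cost).


-- ===== PORT A =====
-- ext = "." + primary.rsplit(".", 1)[-1] if "." in primary else ".unknown"
-- rsplit(".", 1)[-1] (the part after the LAST '.') has no PySem primitive; ported by hand:
-- reverse, take up to the first '.', reverse back — exact for every string.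
def pvAfterLastDot (primary : String) : String :=
  String.mk ((primary.toList.reverse.takeWhile (fun c => c ≠ '.')).reverse)

def pvExtOf (primary : String) : String :=
  if PySem.Str.isIn "." primary then "." ++ pvAfterLastDot primary else ".unknown"

def pvIsTest (f : String) : Bool := PySem.Str.isIn "test" (PySem.Str.lower f)
def pvIsConfig (f : String) : Bool :=
  PySem.Str.endswith f ".yaml" || PySem.Str.endswith f ".yml" || PySem.Str.endswith f ".json" ||
  PySem.Str.endswith f ".toml" || PySem.Str.endswith f ".env"
def pvIsReq (f : String) : Bool := PySem.Str.isIn "requirements" (PySem.Str.lower f)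
def pvIsDoc (f : String) : Bool :=
  PySem.Str.endswith f ".md" || PySem.Str.endswith f ".rst" || PySem.Str.endswith f ".txt"

def extract_domain_key (target_files : List String) (description : String) : String :=
  match target_files with
  | [] => "unknown::unknown"
  | primary :: _ =>
    let ext := pvExtOf primary
    let category :=
      if target_files.any pvIsTest then "test_fix"
      else if target_files.any pvIsConfig then "config"
      else if target_files.any pvIsReq then "dependency"
      else if target_files.any pvIsDoc then "documentation"
      else "code_gen"
    category ++ "::" ++ ext

-- ===== PORT B =====
def pvFileRank (f : String) : Nat :=
  if pvIsTest f then 0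
  else if pvIsConfig f then 1
  else if pvIsReq f then 2
  else if pvIsDoc f then 3
  else 4

def pvCategory : Nat → String
  | 0 => "test_fix"
  | 1 => "config"
  | 2 => "dependency"
  | 3 => "documentation"
  | _ => "code_gen"

def extract_domain_key_alt (target_files : List String) (description : String) : String :=
  match target_files with
  | [] => "unknown::unknown"
  | first :: _ =>
    let ext := pvExtOf first
    -- min(...) over a list that is nonempty here; the getD default is unreachable
    let r := (PySem.List.min? (target_files.map pvFileRank) (fun x => x)).getD 4
    pvCategory r ++ "::" ++ ext

-- ===== PRECONDITION & SPEC =====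
def Spec_extract_domain_key (target_files : List String) (description : String) (out : String) : Prop := out = extract_domain_key_alt target_files description
instance (target_files : List String) (description : String) (out : String) : Decidable (Spec_extract_domain_key target_files description out) := by unfold Spec_extract_domain_key; infer_instance

-- ===== CLAIM (what is proved, stated in full; the proofs are below) =====
def Claim_equal_extract_domain_key : Prop := ∀ (target_files : List String) (description : String), Dom_extract_domain_key target_files description → Spec_extract_domain_key target_files description (extract_domain_key target_files description)

-- ===== LEMMAS AND PROOFS =====

-- the if-chain of A, as a function of the four `any` results, equals the category of the minimum rank
lemma pvRank_eq_zero_iff (f : String) : pvFileRank f = 0 ↔ pvIsTest f = true := by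
  unfold pvFileRank; split_ifs <;> simp_all

lemma pvRank_eq_one_iff (f : String) :
    pvFileRank f = 1 ↔ (pvIsTest f = false ∧ pvIsConfig f = true) := by
  unfold pvFileRank; split_ifs <;> simp_all

lemma pvRank_eq_two_iff (f : String) :
    pvFileRank f = 2 ↔ (pvIsTest f = false ∧ pvIsConfig f = false ∧ pvIsReq f = true) := by
  unfold pvFileRank; split_ifs <;> simp_all

lemma pvRank_eq_three_iff (f : String) :
    pvFileRank f = 3 ↔ (pvIsTest f = false ∧ pvIsConfig f = false ∧ pvIsReq f = false ∧ pvIsDoc f = true) := by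
  unfold pvFileRank; split_ifs <;> simp_all

lemma pvMin_eq (l : List String) (k : Nat)
    (hmem : ∃ f ∈ l, pvFileRank f = k) (hle : ∀ f ∈ l, k ≤ pvFileRank f) :
    (PySem.List.min? (l.map pvFileRank) (fun x => x)).getD 4 = k := by
  obtain ⟨f, hf, hfk⟩ := hmem
  have hne : l.map pvFileRank ≠ [] := by
    simp only [ne_eq, List.map_eq_nil_iff]; intro h; subst h; exact absurd hf (List.not_mem_nil)
  obtain ⟨m, hm⟩ : ∃ m, PySem.List.min? (l.map pvFileRank) (fun x => x) = some m := by
    cases h : PySem.List.min? (l.map pvFileRank) (fun x => x) with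
    | none => exact absurd ((PySem.List.min?_eq_none_iff _ _).mp h) hne
    | some m => exact ⟨m, rfl⟩
  have hmmem : m ∈ l.map pvFileRank := PySem.List.min?_mem hm
  have hmin : ∀ y ∈ l.map pvFileRank, m ≤ y := by
    intro y hy; exact PySem.List.min?_isMin hm y hy
  obtain ⟨g, hg, hgm⟩ := List.mem_map.mp hmmem
  have h1 : k ≤ m := hgm ▸ hle g hg
  have h2 : m ≤ k := hfk ▸ hmin (pvFileRank f) (List.mem_map.mpr ⟨f, hf, rfl⟩)
  simp [hm, le_antisymm h2 h1]

theorem extract_domain_key_spec : Claim_equal_extract_domain_key := by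
  intro target_files description _
  unfold Spec_extract_domain_key extract_domain_key extract_domain_key_alt
  cases target_files with
  | nil => rfl
  | cons primary rest =>
    simp only
    set l := primary :: rest with hl
    by_cases hT : l.any pvIsTest
    · obtain ⟨f, hf, hft⟩ := List.any_eq_true.mp hT
      rw [pvMin_eq l 0 ⟨f, hf, (pvRank_eq_zero_iff f).mpr hft⟩ (fun _ _ => Nat.zero_le _)]
      simp [hT, pvCategory]
    · have hT' : ∀ f ∈ l, pvIsTest f = false := by
        intro f hf; by_contra h
        exact hT (List.any_eq_true.mpr ⟨f, hf, by simpa using h⟩)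
      by_cases hC : l.any pvIsConfig
      · obtain ⟨f, hf, hfc⟩ := List.any_eq_true.mp hC
        rw [pvMin_eq l 1 ⟨f, hf, (pvRank_eq_one_iff f).mpr ⟨hT' f hf, hfc⟩⟩
          (by intro g hg; have := hT' g hg; unfold pvFileRank; split_ifs <;> simp_all)]
        simp [hT, hC, pvCategory]
      · have hC' : ∀ f ∈ l, pvIsConfig f = false := by
          intro f hf; by_contra h
          exact hC (List.any_eq_true.mpr ⟨f, hf, by simpa using h⟩)
        by_cases hR : l.any pvIsReq
        · obtain ⟨f, hf, hfr⟩ := List.any_eq_true.mp hR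
          rw [pvMin_eq l 2 ⟨f, hf, (pvRank_eq_two_iff f).mpr ⟨hT' f hf, hC' f hf, hfr⟩⟩
            (by intro g hg; have h1 := hT' g hg; have h2 := hC' g hg
                unfold pvFileRank; split_ifs <;> simp_all)]
          simp [hT, hC, hR, pvCategory]
        · have hR' : ∀ f ∈ l, pvIsReq f = false := by
            intro f hf; by_contra h
            exact hR (List.any_eq_true.mpr ⟨f, hf, by simpa using h⟩)
          by_cases hD : l.any pvIsDoc
          · obtain ⟨f, hf, hfd⟩ := List.any_eq_true.mp hD
            rw [pvMin_eq l 3 ⟨f, hf, (pvRank_eq_three_iff f).mpr ⟨hT' f hf, hC' f hf, hR' f hf, hfd⟩⟩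
              (by intro g hg; have h1 := hT' g hg; have h2 := hC' g hg; have h3 := hR' g hg
                  unfold pvFileRank; split_ifs <;> simp_all)]
            simp [hT, hC, hR, hD, pvCategory]
          · have hD' : ∀ f ∈ l, pvIsDoc f = false := by
              intro f hf; by_contra h
              exact hD (List.any_eq_true.mpr ⟨f, hf, by simpa using h⟩)
            rw [pvMin_eq l 4 ⟨primary, by simp [hl], by
                have h1 := hT' primary (by simp [hl]); have h2 := hC' primary (by simp [hl])
                have h3 := hR' primary (by simp [hl]); have h4 := hD' primary (by simp [hl])
                unfold pvFileRank; split_ifs <;> simp_all⟩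
              (by intro g hg; have h1 := hT' g hg; have h2 := hC' g hg
                  have h3 := hR' g hg; have h4 := hD' g hg
                  unfold pvFileRank; split_ifs <;> simp_all)]
            simp [hT, hC, hR, hD, pvCategory]
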